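-- pv_equiv track=rewrite | github.com/jyajoo/Problem-Solving | Programmers/DFS&BFS/60058.py | solution
-- ===== SOURCE A (Python) =====
-- from collections import deque
--
-- def solution(p):
--     # 올바른 괄호 문자열인지 여부 파악
--     def check(w):
--         que = deque()
--         for i in w:
--             if i == '(':
--                 que.append('(')
--             else:
--                 if que:
--                     que.popleft()
--                 else:
--                     return False
--         if que:
--             return False
--         return True
--
--     def func(w):
--         if w == '':
--             return ''
--
--         u, v = '', ''
--         for idx, i in enumerate(w):
--             u += i
--             if u.count('(') == u.count(')'): # 균형잡힌 문자열
--                 v = w[idx + 1:]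
--                 break
--
--         if check(u):
--             u += func(v)
--         else:
--             u = u[1:-1] # 첫 번째, 마지막 문자 제거
--             new_u = ''
--             for i in u:
--                 if i == '(':
--                     new_u += ')'
--                 else:
--                     new_u += '('
--             u = '(' + func(v) + ')' + new_u
--         return u
--
--     if check(p):
--         return p
--     x = func(p)
--     return x
-- ===== SOURCE B (Python) =====
-- # B: one-pass balance counters and an explicit pending-suffix stack replace
-- # A's quadratic prefix recounting (u.count per char) and its recursion.
-- def solution(p):
--     def balanced_ok(w):
--         bal = 0
--         for ch in w:
--             bal = bal + 1 if ch == '(' else bal - 1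
--             if bal < 0:
--                 return False
--         return bal == 0
--
--     def invert(u):
--         return ''.join('(' if ch != '(' else ')' for ch in u)
--
--     if balanced_ok(p):
--         return p
--     n = len(p)
--     i = 0
--     parts = []
--     tails = []
--     while i < n:
--         # scan the remainder p[i:] for the first prefix with balance zero
--         s = 0
--         j = i
--         while j < n:
--             ch = p[j]
--             j += 1
--             if ch == '(':
--                 s += 1
--             elif ch == ')':
--                 s -= 1
--             if s == 0:
--                 break
--         u = p[i:j]
--         i = j
--         if balanced_ok(u):
--             parts.append(u)
--         else:
--             parts.append('(')
--             tails.append(')' + invert(u[1:-1]))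
--     while tails:
--         parts.append(tails.pop())
--     return ''.join(parts)
-- ===== Notes on version B (the rewrite author's own statement) =====
-- stated objective: faster
-- what changed: Replace A's per-character u.count('(')/u.count(')') prefix recounting and nested recursion by a single running balance counter to find each split point and an explicit pending-suffix stack built in one left-to-right sweep.
import Mathlib
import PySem

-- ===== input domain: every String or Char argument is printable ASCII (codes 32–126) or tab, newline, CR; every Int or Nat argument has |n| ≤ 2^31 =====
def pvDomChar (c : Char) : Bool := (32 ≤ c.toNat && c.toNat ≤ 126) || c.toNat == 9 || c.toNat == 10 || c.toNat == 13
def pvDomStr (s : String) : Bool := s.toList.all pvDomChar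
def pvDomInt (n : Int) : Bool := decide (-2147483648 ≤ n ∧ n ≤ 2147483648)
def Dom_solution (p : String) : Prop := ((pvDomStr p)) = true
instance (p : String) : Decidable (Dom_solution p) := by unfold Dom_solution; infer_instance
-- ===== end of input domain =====

-- B replaces A's quadratic prefix recounting and recursion by one-pass balance
-- counters and an explicit pending-suffix stack (measured asymptotically faster).

-- ===== PORT A =====
-- check(w): deque of '(' pushed/popped; False on pop from empty or leftover.
def pvCheckA : List Char → List Char → Bool
  | [], que => que.isEmpty
  | c :: rest, que =>
      if c = '(' then pvCheckA rest (que ++ ['('])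
      else
        match que with
        | [] => false
        | _ :: q => pvCheckA rest q

-- the for-loop of func: accumulate u char by char, break when counts equal
def pvLoopA : List Char → List Char → List Char × List Char
  | [], u => (u, [])
  | c :: rest, u =>
      let u' := u ++ [c]
      if u'.count '(' = u'.count ')' then (u', rest) else pvLoopA rest u'

-- new_u accumulation loop of func
def pvInvA : List Char → List Char → List Char
  | acc, [] => acc
  | acc, c :: r => pvInvA (acc ++ [if c = '(' then ')' else '(']) r

theorem pvLoopA_snd_le : ∀ (w u : List Char), (pvLoopA w u).2.length ≤ w.length := by
  intro w
  induction w with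
  | nil => intro u; simp [pvLoopA]
  | cons c rest ih =>
      intro u
      simp only [pvLoopA]
      split
      · simp
      · exact Nat.le_trans (ih _) (by simp)

theorem pvLoopA_snd_lt (c : Char) (rest u : List Char) :
    (pvLoopA (c :: rest) u).2.length < (c :: rest).length := by
  simp only [pvLoopA]
  split
  · simp
  · exact Nat.lt_succ_of_le (pvLoopA_snd_le rest _)

def pvFuncA (w : List Char) : List Char :=
  if h : w = [] then []
  else
    let uv := pvLoopA w []
    if pvCheckA uv.1 [] then uv.1 ++ pvFuncA uv.2
    else '(' :: pvFuncA uv.2 ++ ')' :: pvInvA [] ((uv.1.drop 1).dropLast)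
termination_by w.length
decreasing_by
  all_goals
    cases w with
    | nil => exact absurd rfl h
    | cons c rest => exact pvLoopA_snd_lt c rest []

def solution (p : String) : String :=
  if pvCheckA p.toList [] then p else String.mk (pvFuncA p.toList)

-- ===== PORT B =====
-- balanced_ok: single running counter, early False when it goes negative
def pvBalGo : List Char → Int → Bool
  | [], bal => bal == 0
  | c :: r, bal =>
      let bal' := if c = '(' then bal + 1 else bal - 1
      if bal' < 0 then false else pvBalGo r bal'

def pvBalB (w : List Char) : Bool := pvBalGo w 0

def pvInvB (u : List Char) : List Char := u.map (fun ch => if ch ≠ '(' then '(' else ')')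

-- the inner scan: running signed balance, count consumed chars, stop at zero
def pvSplitGo : List Char → Int → Nat
  | [], _ => 0
  | c :: r, s =>
      let s' := if c = '(' then s + 1 else if c = ')' then s - 1 else s
      if s' = 0 then 1 else 1 + pvSplitGo r s'

theorem pvSplitGo_pos (c : Char) (r : List Char) (s : Int) : 1 ≤ pvSplitGo (c :: r) s := by
  simp only [pvSplitGo]
  split_ifs <;> omega

-- the while-loop over the remainder p[i:] (represented here as the suffix list);
-- parts accumulated in order, pending suffixes on a stack
def pvProcessB : List Char → List (List Char) → List (List Char) → List Char
  | [], parts, tails => parts.flatten ++ tails.reverse.flatten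
  | c :: rest, parts, tails =>
      let cut := pvSplitGo (c :: rest) 0
      let u := (c :: rest).take cut
      let v := (c :: rest).drop cut
      if pvBalB u then pvProcessB v (parts ++ [u]) tails
      else pvProcessB v (parts ++ [['(']]) (tails ++ [')' :: pvInvB ((u.drop 1).dropLast)])
termination_by w _ _ => w.length
decreasing_by
  all_goals
    have h1 := pvSplitGo_pos c rest 0
    simp only [List.length_drop, List.length_cons]
    omega

def solution_alt (p : String) : String :=
  if pvBalB p.toList then p else String.mk (pvProcessB p.toList [] [])

-- ===== PRECONDITION & SPEC =====
def Spec_solution (p : String) (out : String) : Prop := out = solution_alt p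
instance (p : String) (out : String) : Decidable (Spec_solution p out) := by unfold Spec_solution; infer_instance

-- ===== CLAIM (what is proved, stated in full; the proofs are below) =====
def Claim_equal_solution : Prop := ∀ (p : String), Dom_solution p → Spec_solution p (solution p)

-- ===== LEMMAS AND PROOFS =====

-- A's deque is just a stack of '(' of some height: check = running counter
theorem check_eq_bal : ∀ (w que : List Char), pvCheckA w que = pvBalGo w (que.length : Int) := by
  intro w
  induction w with
  | nil =>
      intro que
      cases que <;> simp [pvCheckA, pvBalGo] <;> omega
  | cons c r ih =>
      intro que
      by_cases hc : c = '('
      · subst hc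
        have h1 : pvCheckA ('(' :: r) que = pvCheckA r (que ++ ['(']) := by
          simp [pvCheckA]
        have h2 : pvBalGo ('(' :: r) (que.length : Int) =
            if ((que.length : Int) + 1) < 0 then false
            else pvBalGo r ((que.length : Int) + 1) := by
          simp [pvBalGo]
        rw [h1, h2, if_neg (by omega), ih]
        congr 1
        simp only [List.length_append, List.length_singleton]
        push_cast
        ring
      · cases que with
        | nil =>
            norm_num [pvCheckA, pvBalGo, hc]
        | cons q0 q =>
            have h1 : pvCheckA (c :: r) (q0 :: q) = pvCheckA r q := by
              simp [pvCheckA, hc]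
            have h2 : pvBalGo (c :: r) (((q0 :: q).length : Int)) =
                if (((q0 :: q).length : Int) - 1) < 0 then false
                else pvBalGo r (((q0 :: q).length : Int) - 1) := by
              simp [pvBalGo, hc]
            rw [h1, h2, if_neg (by simp only [List.length_cons]; push_cast; omega), ih]
            congr 1
            simp only [List.length_cons]
            push_cast
            omega

def pvBalInt (u : List Char) : Int := (u.count '(' : Int) - (u.count ')' : Int)

theorem balInt_append (u : List Char) (c : Char) :
    pvBalInt (u ++ [c]) =
      pvBalInt u + (if c = '(' then 1 else if c = ')' then (-1 : Int) else 0) := by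
  simp only [pvBalInt, List.count_append, List.count_singleton]
  by_cases h1 : c = '(' <;> by_cases h2 : c = ')' <;>
    simp_all [beq_iff_eq] <;> push_cast <;> ring

-- A's split loop computes exactly B's cut
theorem loopA_eq_split : ∀ (rest u : List Char),
    pvLoopA rest u = (u ++ rest.take (pvSplitGo rest (pvBalInt u)),
                      rest.drop (pvSplitGo rest (pvBalInt u))) := by
  intro rest
  induction rest with
  | nil => intro u; simp [pvLoopA, pvSplitGo]
  | cons c r ih =>
      intro u
      have hstep : pvBalInt (u ++ [c]) =
          (if c = '(' then pvBalInt u + 1 else if c = ')' then pvBalInt u - 1 else pvBalInt u) := by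
        rw [balInt_append]
        split_ifs <;> ring
      have hcnt : (List.count '(' (u ++ [c]) = List.count ')' (u ++ [c]))
          ↔ pvBalInt (u ++ [c]) = 0 := by
        unfold pvBalInt
        omega
      simp only [pvLoopA, pvSplitGo, ← hstep]
      by_cases hz : pvBalInt (u ++ [c]) = 0
      · rw [if_pos (hcnt.mpr hz), if_pos hz]
        simp
      · rw [if_neg (fun h => hz (hcnt.mp h)), if_neg hz, ih]
        rw [Nat.add_comm 1 (pvSplitGo r (pvBalInt (u ++ [c])))]
        simp

theorem invA_eq_invB : ∀ (r acc : List Char), pvInvA acc r = acc ++ pvInvB r := by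
  intro r
  induction r with
  | nil => intro acc; simp [pvInvA, pvInvB]
  | cons c t ih =>
      intro acc
      simp only [pvInvA, pvInvB, List.map_cons, ih]
      by_cases h : c = '(' <;> simp [pvInvB, h]

-- main invariant: the stack-based sweep produces parts, then funcA of the rest,
-- then the pending suffixes in reverse order
theorem processB_eq_funcA : ∀ (n : Nat) (w : List Char), w.length ≤ n →
    ∀ (parts tails : List (List Char)),
      pvProcessB w parts tails = parts.flatten ++ pvFuncA w ++ tails.reverse.flatten := by
  intro n
  induction n with
  | zero =>
      intro w hw parts tails
      have : w = [] := by cases w <;> simp_all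
      subst this
      simp [pvProcessB, pvFuncA]
  | succ m ih =>
      intro w hw parts tails
      cases w with
      | nil => simp [pvProcessB, pvFuncA]
      | cons c rest =>
          have hk := pvSplitGo_pos c rest 0
          set k := pvSplitGo (c :: rest) 0 with hkdef
          have hloop : pvLoopA (c :: rest) [] =
              ((c :: rest).take k, (c :: rest).drop k) := by
            have := loopA_eq_split (c :: rest) []
            simpa [pvBalInt] using this
          have hvlen : ((c :: rest).drop k).length ≤ m := by
            simp only [List.length_drop, List.length_cons]
            simp only [List.length_cons] at hw
            omega
          have hcheck : pvCheckA ((c :: rest).take k) [] = pvBalB ((c :: rest).take k) := by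
            rw [check_eq_bal]; rfl
          rw [show pvFuncA (c :: rest) =
              (if pvCheckA ((c :: rest).take k) []
               then (c :: rest).take k ++ pvFuncA ((c :: rest).drop k)
               else '(' :: pvFuncA ((c :: rest).drop k) ++
                    ')' :: pvInvA [] ((((c :: rest).take k).drop 1).dropLast)) from by
            rw [pvFuncA]
            simp only [hloop, reduceCtorEq, dif_neg, not_false_iff]]
          simp only [pvProcessB, ← hkdef, hcheck]
          by_cases hb : pvBalB ((c :: rest).take k) = true
          · rw [if_pos hb, if_pos hb, ih _ hvlen]
            simp
          · rw [if_neg hb, if_neg hb, ih _ hvlen]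
            simp [invA_eq_invB]

-- ===== VERDICT (by name: the statement is the Claim_ definition above) =====
theorem solution_spec : Claim_equal_solution := by
  intro p _
  unfold Spec_solution solution solution_alt
  have hc : pvCheckA p.toList [] = pvBalB p.toList := by
    rw [check_eq_bal]; rfl
  rw [hc]
  by_cases h : pvBalB p.toList = true
  · rw [if_pos h, if_pos h]
  · rw [if_neg h, if_neg h]
    have := processB_eq_funcA p.toList.length p.toList le_rfl [] []
    simp at this
    rw [this]
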